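-- pv_equiv track=rewrite | github.com/dodoyeon/SW_Academy | greedy/1417_congress.py | maesu_3
-- ===== SOURCE A (Python) =====
-- def maesu_3(n, me, cand):
--     num = 0
--     if len(cand)==0:
--         return 0
--     while cand[-1]>=me:
--         num += 1
--         me += 1
--         cand[-1] -= 1
--         cand.sort()
--     return num
-- ===== SOURCE B (Python) =====
-- def maesu_3(n, me, cand):
--     if not cand or cand[-1] < me:
--         return 0
--     # The first vote is taken from the last-listed candidate, every later one
--     # from the current leader; t further steals then suffice exactly when t
--     # votes are enough to push every rival below me's total, so the count is
--     # found by a binary search on that feasibility test instead of simulating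
--     # the election steal by steal.
--     votes = cand[:-1] + [cand[-1] - 1]
--     me += 1
--
--     def need(x):
--         return sum(c - x + 1 for c in votes if c >= x)
--
--     lo, hi = 0, need(me)
--     while lo < hi:
--         mid = (lo + hi) // 2
--         if need(me + mid) <= mid:
--             hi = mid
--         else:
--             lo = mid + 1
--     return 1 + lo
-- ===== Notes on version B (the rewrite author's own statement) =====
-- stated objective: faster
-- what changed: A simulates the election one stolen vote at a time, re-sorting the whole list after every steal; B computes the number of further steals needed after the first one in closed form, by binary-searching the smallest t for which t steals can push every rival below me+t (a feasibility sum over the votes), so no simulation and no sorting at all.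
import Mathlib
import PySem

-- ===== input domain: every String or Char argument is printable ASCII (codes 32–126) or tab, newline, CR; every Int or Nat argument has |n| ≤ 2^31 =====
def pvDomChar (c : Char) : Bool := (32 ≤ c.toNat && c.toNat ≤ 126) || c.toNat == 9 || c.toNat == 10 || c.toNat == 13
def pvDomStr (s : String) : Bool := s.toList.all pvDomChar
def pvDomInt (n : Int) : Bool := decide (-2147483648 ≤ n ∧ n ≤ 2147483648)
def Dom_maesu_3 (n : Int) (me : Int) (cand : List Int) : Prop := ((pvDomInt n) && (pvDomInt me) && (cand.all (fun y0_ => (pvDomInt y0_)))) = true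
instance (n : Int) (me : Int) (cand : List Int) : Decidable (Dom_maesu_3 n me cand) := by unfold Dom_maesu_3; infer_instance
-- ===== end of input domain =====

-- B replaces A's steal-one-vote-then-re-sort simulation by a binary search for the smallest
-- feasible number of further steals (objective: faster). A mutates its list argument in place
-- (decrements and sorts it); B does not — the equivalence proved here is about the RETURN value only.

-- ===== PORT A =====
-- iteration bound used as structural fuel for the while loop (the loop strictly decreases it)
def pvPhi (me : Int) (xs : List Int) : Nat := (xs.map (fun c => (c + 1 - me).toNat)).sum

-- 'while cand[-1] >= me: num += 1; me += 1; cand[-1] -= 1; cand.sort()'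
def pvLoopA (fuel : Nat) (num : Int) (me : Int) (xs : List Int) : Int :=
  match fuel with
  | 0 => num           -- never reached: maesu_3 passes fuel = pvPhi me xs, which bounds the iterations
  | fuel + 1 =>
    match PySem.List.pyGet? xs (-1) with
    | none => num      -- unreachable totalization: the list is never empty here
    | some l =>
      if me ≤ l then
        pvLoopA fuel (num + 1) (me + 1) (PySem.List.sorted (xs.dropLast ++ [l - 1]) (fun x => x) false)
      else num

def maesu_3 (n : Int) (me : Int) (cand : List Int) : Int :=
  if (cand.length : Int) = 0 then 0 else pvLoopA (pvPhi me cand) 0 me cand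

-- ===== PORT B =====
-- 'sum(c - x + 1 for c in votes if c >= x)'
def pvNeed (x : Int) (vs : List Int) : Int :=
  ((vs.filter (fun c => decide (x ≤ c))).map (fun c => c - x + 1)).sum

-- 'while lo < hi: mid = (lo+hi)//2; if need(me+mid) <= mid: hi = mid else: lo = mid+1'
def pvBS (fuel : Nat) (me : Int) (lo : Int) (hi : Int) (vs : List Int) : Int :=
  match fuel with
  | 0 => lo            -- never reached: maesu_3_alt passes fuel = hi.toNat ≥ the iteration count
  | fuel + 1 =>
    if lo < hi then
      let mid := PySem.Int.floordiv (lo + hi) 2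
      if pvNeed (me + mid) vs ≤ mid then pvBS fuel me lo mid vs
      else pvBS fuel me (mid + 1) hi vs
    else lo

def maesu_3_alt (n : Int) (me : Int) (cand : List Int) : Int :=
  if cand = [] then 0
  else
    match PySem.List.pyGet? cand (-1) with
    | none => 0        -- unreachable: cand ≠ []
    | some last =>
      if last < me then 0
      else
        let votes := PySem.List.slice cand none (some (-1)) ++ [last - 1]
        let hi := pvNeed (me + 1) votes
        1 + pvBS hi.toNat (me + 1) 0 hi votes

-- ===== PRECONDITION & SPEC =====
def Spec_maesu_3 (n : Int) (me : Int) (cand : List Int) (out : Int) : Prop := out = maesu_3_alt n me cand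
instance (n : Int) (me : Int) (cand : List Int) (out : Int) : Decidable (Spec_maesu_3 n me cand out) := by unfold Spec_maesu_3; infer_instance

-- ===== CLAIM (what is proved, stated in full; the proofs are below) =====
def Claim_equal_maesu_3 : Prop := ∀ (n : Int) (me : Int) (cand : List Int), Dom_maesu_3 n me cand → Spec_maesu_3 n me cand (maesu_3 n me cand)

-- ===== LEMMAS AND PROOFS =====

-- t is the least nonnegative steal count whose feasibility test passes
def pvLeast (me : Int) (vs : List Int) (t : Int) : Prop :=
  0 ≤ t ∧ pvNeed (me + t) vs ≤ t ∧ ∀ s, 0 ≤ s → s < t → ¬ pvNeed (me + s) vs ≤ s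

theorem pvNeed_cons (x c : Int) (vs : List Int) :
    pvNeed x (c :: vs) = (if x ≤ c then c - x + 1 else 0) + pvNeed x vs := by
  by_cases h : x ≤ c <;> simp [pvNeed, h]

theorem pvNeed_nil (x : Int) : pvNeed x [] = 0 := rfl

theorem pvNeed_append (x : Int) (a b : List Int) :
    pvNeed x (a ++ b) = pvNeed x a + pvNeed x b := by
  simp [pvNeed, List.filter_append]

theorem pvNeed_perm (x : Int) (a b : List Int) (h : a.Perm b) : pvNeed x a = pvNeed x b :=
  ((h.filter _).map _).sum_eq

theorem pvNeed_nonneg (x : Int) (vs : List Int) : 0 ≤ pvNeed x vs := by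
  induction vs with
  | nil => simp [pvNeed_nil]
  | cons c t ih =>
    rw [pvNeed_cons]
    split_ifs with h <;> omega

theorem pvNeed_antitone (vs : List Int) (x y : Int) (h : x ≤ y) :
    pvNeed y vs ≤ pvNeed x vs := by
  induction vs with
  | nil => simp [pvNeed_nil]
  | cons c t ih =>
    rw [pvNeed_cons, pvNeed_cons]
    split_ifs with h1 h2 <;> omega

theorem pvNeed_eq_zero (x : Int) (vs : List Int) (h : ∀ c ∈ vs, c < x) : pvNeed x vs = 0 := by
  induction vs with
  | nil => rfl
  | cons c t ih =>
    rw [pvNeed_cons, ih (fun c hc => h c (List.mem_cons_of_mem _ hc))]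
    have := h c List.mem_cons_self
    rw [if_neg (by omega)]
    omega

theorem pvNeed_pos (x : Int) (vs : List Int) (c : Int) (hc : c ∈ vs) (hx : x ≤ c) :
    c - x + 1 ≤ pvNeed x vs := by
  induction vs with
  | nil => cases hc
  | cons d t ih =>
    rw [pvNeed_cons]
    rcases List.mem_cons.mp hc with h | h
    · subst h
      have := pvNeed_nonneg x t
      rw [if_pos hx]; omega
    · have := ih h
      split_ifs with h1 <;> omega

theorem pvLeast_unique (me : Int) (vs : List Int) (t1 t2 : Int)
    (h1 : pvLeast me vs t1) (h2 : pvLeast me vs t2) : t1 = t2 := by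
  obtain ⟨a1, b1, c1⟩ := h1
  obtain ⟨a2, b2, c2⟩ := h2
  by_contra hne
  rcases lt_trichotomy t1 t2 with h | h | h
  · exact c2 t1 a1 h b1
  · exact hne h
  · exact c1 t2 a2 h b2

theorem pvLeast_perm (me : Int) (a b : List Int) (h : a.Perm b) (t : Int)
    (hl : pvLeast me a t) : pvLeast me b t := by
  obtain ⟨h1, h2, h3⟩ := hl
  refine ⟨h1, ?_, ?_⟩
  · rw [← pvNeed_perm _ _ _ h]; exact h2
  · intro s hs hst
    rw [← pvNeed_perm _ _ _ h]
    exact h3 s hs hst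

theorem pvLoopA_step (fuel : Nat) (num : Int) (me : Int) (xs : List Int) (l : Int)
    (h : PySem.List.pyGet? xs (-1) = some l) :
    pvLoopA (fuel + 1) num me xs = if me ≤ l then
      pvLoopA fuel (num + 1) (me + 1) (PySem.List.sorted (xs.dropLast ++ [l - 1]) (fun x => x) false)
    else num := by
  rw [pvLoopA, h]

theorem pv_le_getLast_of_pairwise (xs : List Int) (hp : xs.Pairwise (· ≤ ·)) (hxs : xs ≠ [])
    (a : Int) (ha : a ∈ xs) : a ≤ xs.getLast hxs := by
  rw [List.pairwise_iff_getElem] at hp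
  obtain ⟨i, hi, rfl⟩ := List.mem_iff_getElem.mp ha
  rw [List.getLast_eq_getElem]
  rcases Nat.lt_or_ge i (xs.length - 1) with h | h
  · exact hp i (xs.length - 1) hi (by omega) h
  · have : i = xs.length - 1 := by omega
    subst this; exact le_refl _

theorem pvPhi_ge (me m : Int) (xs : List Int) (hm : m ∈ xs) :
    (m + 1 - me).toNat ≤ pvPhi me xs :=
  List.single_le_sum (fun _ _ => Nat.zero_le _) _ (List.mem_map_of_mem hm)

theorem pvPhi_dec (me l : Int) (xs : List Int) (hxs : xs ≠ []) (hl : xs.getLast hxs = l)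
    (hme : me ≤ l) :
    pvPhi (me + 1) (PySem.List.sorted (xs.dropLast ++ [l - 1]) (fun x => x) false) < pvPhi me xs := by
  have hperm : (PySem.List.sorted (xs.dropLast ++ [l - 1]) (fun x => x) false).Perm
      (xs.dropLast ++ [l - 1]) := PySem.List.sorted_perm _ _ _
  have hsum : pvPhi (me + 1) (PySem.List.sorted (xs.dropLast ++ [l - 1]) (fun x => x) false)
      = ((xs.dropLast ++ [l - 1]).map (fun c => (c + 1 - (me + 1)).toNat)).sum :=
    (hperm.map _).sum_eq
  have hxs2 : xs.dropLast ++ [l] = xs := by rw [← hl]; exact List.dropLast_concat_getLast hxs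
  have key : ((xs.dropLast ++ [l - 1]).map (fun c => (c + 1 - (me + 1)).toNat)).sum
      < ((xs.dropLast ++ [l]).map (fun c => (c + 1 - me).toNat)).sum := by
    simp only [List.map_append, List.sum_append, List.map_cons, List.map_nil,
      List.sum_cons, List.sum_nil]
    have h1 : ((xs.dropLast).map (fun c => (c + 1 - (me + 1)).toNat)).sum
        ≤ ((xs.dropLast).map (fun c => (c + 1 - me).toNat)).sum := by
      apply List.sum_le_sum
      intro i _; omega
    omega
  have hfin : ((xs.dropLast ++ [l]).map (fun c => (c + 1 - me).toNat)).sum = pvPhi me xs := by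
    rw [hxs2, pvPhi]
  omega

theorem pvPhi_zero (me : Int) (xs : List Int) (h : pvPhi me xs = 0) :
    ∀ c ∈ xs, c < me := by
  intro c hc
  have := pvPhi_ge me c xs hc
  omega

-- after one steal from the last element, the feasibility sum drops by one below the old leader
theorem pvNeed_shift (xs : List Int) (hxs : xs ≠ []) (l : Int) (hl : xs.getLast hxs = l) (x : Int) :
    pvNeed x (PySem.List.sorted (xs.dropLast ++ [l - 1]) (fun y => y) false)
      = pvNeed x xs - (if x ≤ l then 1 else 0) := by
  have hperm := PySem.List.sorted_perm (xs.dropLast ++ [l - 1]) (fun y : Int => y) false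
  rw [pvNeed_perm _ _ _ hperm, pvNeed_append]
  conv_rhs => rw [← List.dropLast_concat_getLast hxs, hl, pvNeed_append]
  rw [pvNeed_cons, pvNeed_nil, pvNeed_cons, pvNeed_nil]
  split_ifs <;> omega

-- A's loop, started on a sorted list, returns num + the least feasible steal count
theorem pvLoopA_char (fuel : Nat) : ∀ (num me : Int) (xs : List Int),
    xs.Pairwise (· ≤ ·) → pvPhi me xs ≤ fuel →
    ∃ t, pvLoopA fuel num me xs = num + t ∧ pvLeast me xs t := by
  induction fuel with
  | zero =>
    intro num me xs hp hphi
    refine ⟨0, by simp [pvLoopA], le_refl 0, ?_, by omega⟩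
    rw [pvNeed_eq_zero (me + 0) xs (fun c hc => by have := pvPhi_zero me xs (by omega) c hc; omega)]
  | succ fuel ih =>
    intro num me xs hp hphi
    by_cases hxs : xs = []
    · subst hxs
      exact ⟨0, by simp [pvLoopA, PySem.List.pyGet?], le_refl 0,
        by rw [pvNeed_nil], by omega⟩
    · have hget : PySem.List.pyGet? xs (-1) = some (xs.getLast hxs) := by
        rw [PySem.List.pyGet?_neg_one, List.getLast?_eq_some_getLast hxs]
      set l := xs.getLast hxs with hldef
      rw [pvLoopA_step fuel num me xs l hget]
      by_cases hme : me ≤ l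
      · rw [if_pos hme]
        set xs' := PySem.List.sorted (xs.dropLast ++ [l - 1]) (fun y => y) false with hxs'
        have hp' : xs'.Pairwise (· ≤ ·) := by
          have := PySem.List.sorted_pairwise (xs.dropLast ++ [l - 1]) (fun y : Int => y)
          simpa using this
        have hdec : pvPhi (me + 1) xs' < pvPhi me xs := pvPhi_dec me l xs hxs rfl hme
        obtain ⟨t', heq, ⟨ht0, htf, htm⟩⟩ := ih (num + 1) (me + 1) xs' hp' (by omega)
        have hshift : ∀ x, pvNeed x xs' = pvNeed x xs - (if x ≤ l then 1 else 0) :=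
          pvNeed_shift xs hxs l rfl
        refine ⟨t' + 1, by rw [heq]; ring, by omega, ?_, ?_⟩
        · -- feasibility at t' + 1
          have h1 := htf
          have h2 := hshift (me + 1 + t')
          have hx : me + (t' + 1) = me + 1 + t' := by ring
          rw [hx]
          by_cases hcase : me + 1 + t' ≤ l
          · rw [if_pos hcase] at h2; omega
          · have : pvNeed (me + 1 + t') xs = 0 :=
              pvNeed_eq_zero _ xs (fun c hc => by
                have := pv_le_getLast_of_pairwise xs hp hxs c hc
                omega)
            omega
        · -- minimality below t' + 1
          intro s hs hst
          rcases eq_or_lt_of_le hs with h0 | h0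
          · -- s = 0 : the old leader alone needs l - me + 1 ≥ 1 steals
            subst h0
            have hmem : l ∈ xs := by rw [hldef]; exact List.getLast_mem hxs
            have := pvNeed_pos (me + 0) xs l hmem (by omega)
            omega
          · -- s = s'' + 1 with s'' < t'
            have hm := htm (s - 1) (by omega) (by omega)
            have h2 := hshift (me + s)
            have hx : me + 1 + (s - 1) = me + s := by ring
            rw [hx] at hm
            by_cases hcase : me + s ≤ l
            · rw [if_pos hcase] at h2; omega
            · have : pvNeed (me + s) xs = 0 :=
                pvNeed_eq_zero _ xs (fun c hc => by
                  have := pv_le_getLast_of_pairwise xs hp hxs c hc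
                  omega)
              omega
      · rw [if_neg hme]
        refine ⟨0, by ring, le_refl 0, ?_, by omega⟩
        rw [pvNeed_eq_zero (me + 0) xs (fun c hc => by
          have := pv_le_getLast_of_pairwise xs hp hxs c hc
          omega)]

-- the bisection loop returns the least feasible value, given a feasible upper end
theorem pvBS_least (fuel : Nat) : ∀ (me lo hi : Int) (vs : List Int),
    0 ≤ lo → lo ≤ hi → (hi - lo).toNat ≤ fuel →
    pvNeed (me + hi) vs ≤ hi →
    (∀ s, 0 ≤ s → s < lo → ¬ pvNeed (me + s) vs ≤ s) →
    pvLeast me vs (pvBS fuel me lo hi vs) := by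
  induction fuel with
  | zero =>
    intro me lo hi vs hlo hle hf hfeas hbelow
    have : lo = hi := by omega
    subst this
    exact ⟨hlo, hfeas, hbelow⟩
  | succ fuel ih =>
    intro me lo hi vs hlo hle hf hfeas hbelow
    have hmid : PySem.Int.floordiv (lo + hi) 2 = (lo + hi) / 2 :=
      PySem.Int.floordiv_eq_ediv_of_pos (by omega)
    simp only [pvBS, hmid]
    by_cases hlt : lo < hi
    · rw [if_pos hlt]
      have hb : lo ≤ (lo + hi) / 2 ∧ (lo + hi) / 2 < hi := by omega
      by_cases hfm : pvNeed (me + (lo + hi) / 2) vs ≤ (lo + hi) / 2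
      · rw [if_pos hfm]
        exact ih me lo ((lo + hi) / 2) vs hlo (by omega) (by omega) hfm hbelow
      · rw [if_neg hfm]
        refine ih me ((lo + hi) / 2 + 1) hi vs (by omega) (by omega) (by omega) hfeas ?_
        intro s hs hst
        rcases lt_or_ge s lo with h | h
        · exact hbelow s hs h
        · -- lo ≤ s ≤ mid : infeasible by monotonicity from mid
          intro hcon
          apply hfm
          calc pvNeed (me + (lo + hi) / 2) vs ≤ pvNeed (me + s) vs :=
                pvNeed_antitone vs (me + s) (me + (lo + hi) / 2) (by omega)
            _ ≤ s := hcon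
            _ ≤ (lo + hi) / 2 := by omega
    · rw [if_neg hlt]
      have : lo = hi := by omega
      subst this
      exact ⟨hlo, hfeas, hbelow⟩

-- ===== VERDICT (by name: the statement is the Claim_ definition above) =====
theorem maesu_3_spec : Claim_equal_maesu_3 := by
  unfold Claim_equal_maesu_3 Spec_maesu_3
  intro n me cand _
  by_cases hnil : cand = []
  · subst hnil
    simp [maesu_3, maesu_3_alt]
  · have hget : PySem.List.pyGet? cand (-1) = some (cand.getLast hnil) := by
      rw [PySem.List.pyGet?_neg_one, List.getLast?_eq_some_getLast hnil]
    have hlen : ¬ ((cand.length : Int) = 0) := by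
      simp [List.length_eq_zero_iff, hnil]
    rw [maesu_3, maesu_3_alt, if_neg hlen, if_neg hnil, hget]
    dsimp only
    set last := cand.getLast hnil with hlastdef
    by_cases hlt : last < me
    · rw [if_pos hlt]
      cases hphi : pvPhi me cand with
      | zero => rfl
      | succ k => rw [pvLoopA_step k 0 me cand last hget, if_neg (by omega)]
    · rw [if_neg hlt, PySem.List.slice_to_neg_one]
      obtain ⟨k, hphi⟩ : ∃ k, pvPhi me cand = k + 1 := by
        have hmem : last ∈ cand := by rw [hlastdef]; exact List.getLast_mem hnil
        have := pvPhi_ge me last cand hmem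
        exact ⟨pvPhi me cand - 1, by omega⟩
      rw [hphi, pvLoopA_step k 0 me cand last hget, if_pos (by omega)]
      have hp1 : (PySem.List.sorted (cand.dropLast ++ [last - 1]) (fun x => x) false).Pairwise (· ≤ ·) := by
        simpa using PySem.List.sorted_pairwise (cand.dropLast ++ [last - 1]) (fun x : Int => x)
      have hdec : pvPhi (me + 1) (PySem.List.sorted (cand.dropLast ++ [last - 1]) (fun x => x) false)
          < pvPhi me cand := pvPhi_dec me last cand hnil rfl (by omega)
      obtain ⟨t, heq, hleast⟩ := pvLoopA_char k (0 + 1) (me + 1)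
        (PySem.List.sorted (cand.dropLast ++ [last - 1]) (fun x => x) false) hp1 (by omega)
      rw [heq]
      have hperm : (PySem.List.sorted (cand.dropLast ++ [last - 1]) (fun x => x) false).Perm
          (cand.dropLast ++ [last - 1]) := PySem.List.sorted_perm _ _ _
      have hA := pvLeast_perm (me + 1) _ _ hperm t hleast
      have hhi0 := pvNeed_nonneg (me + 1) (cand.dropLast ++ [last - 1])
      have hbs : pvLeast (me + 1) (cand.dropLast ++ [last - 1])
          (pvBS (pvNeed (me + 1) (cand.dropLast ++ [last - 1])).toNat (me + 1) 0
            (pvNeed (me + 1) (cand.dropLast ++ [last - 1])) (cand.dropLast ++ [last - 1])) := by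
        refine pvBS_least _ (me + 1) 0 _ _ (le_refl 0) hhi0 (by omega) ?_ ?_
        · have := pvNeed_antitone (cand.dropLast ++ [last - 1]) (me + 1)
            (me + 1 + pvNeed (me + 1) (cand.dropLast ++ [last - 1])) (by omega)
          omega
        · intro s hs hst
          exact absurd hst (by omega)
      rw [pvLeast_unique (me + 1) _ t _ hA hbs]
      omega
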